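-- pv_equiv track=rewrite | github.com/vllm-project/vllm | vllm/worker/spec_decode/scoring.py | _get_token_ids_to_score
-- ===== SOURCE A (Python) =====
-- from typing import Iterator, List, Tuple, Optional, Union, Dict
--
-- TokenId = int
--
-- def _get_token_ids_to_score(
--
--         full_spec_token_ids: List[int]  # shape: [k]
-- ) -> List[List[TokenId]]:
--     """Given an int tensor of proposal token ids, return a list of
--     token ids that should be scored.
--
--     Returns k+1 output lists. The additional one is used for generating the
--     bonus token.
--
--     Example:
--         Input: [0, 1, 2, 3] (k=4)
--         Output: (k+1 lists)
--             []
--             [0]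
--             [0, 1]
--             [0, 1, 2]
--             [0, 1, 2, 3]
--     """
--     empty_token_ids = []
--
--     token_ids_to_score = [empty_token_ids]
--     token_ids_to_score.extend([
--         full_spec_token_ids[:i + 1]
--         for i in range(len(full_spec_token_ids))
--     ])
--     return token_ids_to_score
-- ===== SOURCE B (Python) =====
-- from typing import List
--
-- TokenId = int
--
-- def _get_token_ids_to_score(
--         full_spec_token_ids: List[int]  # shape: [k]
-- ) -> List[List[TokenId]]:
--     # Build each prefix by extending the previous one instead of re-slicing.
--     token_ids_to_score = [[]]
--     acc = []
--     for t in full_spec_token_ids: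
--         acc = acc + [t]
--         token_ids_to_score.append(acc)
--     return token_ids_to_score
-- ===== Notes on version B (the rewrite author's own statement) =====
-- stated objective: alternative
-- what changed: Builds each prefix incrementally by extending an accumulator in one pass instead of slicing the original list once per index.
import Mathlib
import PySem

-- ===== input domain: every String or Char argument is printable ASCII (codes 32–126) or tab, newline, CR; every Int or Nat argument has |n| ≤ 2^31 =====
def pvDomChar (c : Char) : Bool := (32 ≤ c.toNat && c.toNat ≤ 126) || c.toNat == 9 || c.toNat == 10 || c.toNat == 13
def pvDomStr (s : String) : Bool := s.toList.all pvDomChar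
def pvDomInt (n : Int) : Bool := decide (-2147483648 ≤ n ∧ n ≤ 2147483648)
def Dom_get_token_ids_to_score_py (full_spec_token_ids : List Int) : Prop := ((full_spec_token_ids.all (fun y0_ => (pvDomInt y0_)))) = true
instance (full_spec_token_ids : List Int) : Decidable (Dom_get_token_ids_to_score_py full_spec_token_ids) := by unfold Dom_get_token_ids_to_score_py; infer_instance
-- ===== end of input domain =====

-- B builds each prefix by extending an accumulator in one pass instead of slicing per index.

-- ===== PORT A =====
def get_token_ids_to_score_py (full_spec_token_ids : List Int) : List (List Int) :=
  let empty_token_ids : List Int := []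
  let token_ids_to_score : List (List Int) := [empty_token_ids]
  let token_ids_to_score := token_ids_to_score ++
    ((PySem.List.pyRange 0 (full_spec_token_ids.length : Int) 1).map
      (fun i => PySem.List.slice full_spec_token_ids none (some (i + 1))))
  token_ids_to_score

-- ===== PORT B =====
def get_token_ids_to_score_py_alt (full_spec_token_ids : List Int) : List (List Int) :=
  (full_spec_token_ids.foldl
    (fun (st : List (List Int) × List Int) t =>
      (st.1 ++ [st.2 ++ [t]], st.2 ++ [t]))
    ([[]], [])).1

-- ===== PRECONDITION & SPEC =====
def Spec_get_token_ids_to_score_py (full_spec_token_ids : List Int) (out : List (List Int)) : Prop := out = get_token_ids_to_score_py_alt full_spec_token_ids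
instance (full_spec_token_ids : List Int) (out : List (List Int)) : Decidable (Spec_get_token_ids_to_score_py full_spec_token_ids out) := by unfold Spec_get_token_ids_to_score_py; infer_instance

-- ===== CLAIM (what is proved, stated in full; the proofs are below) =====
def Claim_equal_get_token_ids_to_score_py : Prop := ∀ (full_spec_token_ids : List Int), Dom_get_token_ids_to_score_py full_spec_token_ids → Spec_get_token_ids_to_score_py full_spec_token_ids (get_token_ids_to_score_py full_spec_token_ids)

-- ===== LEMMAS AND PROOFS =====

theorem foldl_prefixes (xs : List Int) (res : List (List Int)) (acc : List Int) :
    (xs.foldl (fun (st : List (List Int) × List Int) t =>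
        (st.1 ++ [st.2 ++ [t]], st.2 ++ [t])) (res, acc)).1
    = res ++ (List.range xs.length).map (fun k => acc ++ xs.take (k + 1)) := by
  induction xs generalizing res acc with
  | nil => simp
  | cons t tl ih =>
    simp only [List.foldl_cons, List.length_cons, List.range_succ_eq_map, List.map_cons,
      List.map_map, ih]
    simp [Function.comp, List.append_assoc]

theorem portA_take (xs : List Int) :
    get_token_ids_to_score_py xs
    = [] :: (List.range xs.length).map (fun k => xs.take (k + 1)) := by
  simp only [get_token_ids_to_score_py, PySem.List.pyRange_zero_natCast, List.map_map]
  refine congrArg (List.cons []) (List.map_congr_left ?_)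
  intro k _
  simp only [Function.comp]
  have : ((k : Int) + 1) = ((k + 1 : Nat) : Int) := by push_cast; ring
  rw [this, PySem.List.slice_to_natCast]

-- ===== VERDICT (by name: the statement is the Claim_ definition above) =====
theorem get_token_ids_to_score_py_spec : Claim_equal_get_token_ids_to_score_py := by
  intro xs _
  unfold Spec_get_token_ids_to_score_py get_token_ids_to_score_py_alt
  rw [foldl_prefixes, portA_take]
  simp
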